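-- pv_equiv track=rewrite | github.com/LukeSkywalker12/Advent-of-Code-2023 | Day-1/day1-2.py | findZahl2
-- ===== SOURCE A (Python) =====
-- numbers = ("1", "2", "3", "4", "5", "6", "7", "8", "9", "one", "two", "three", "four", "five", "six", "seven", "eight", "nine")
--
-- def findZahl2(line):
--     index = -1
--     returnNumber = "0"
--
--     for number in numbers:
--         indexOfNumber = line.rfind(number)                          # 'rfind' gibt index von dem hintersten gefunden Punkt des eingegebenen Wertes
--
--         if indexOfNumber != -1 and indexOfNumber > index:
--             index = indexOfNumber
--             if numbers.index(number) < 9 :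
--                 returnNumber = number
--             else:
--                 returnNumber = str(numbers.index(number)-8)         # Beispiel: "two" hat index 10 -> 10-8 = 2  es wird "2" für zurückgegeben
--
--     return returnNumber
-- ===== SOURCE B (Python) =====
-- WORDS = [("1", "1"), ("2", "2"), ("3", "3"), ("4", "4"), ("5", "5"),
--          ("6", "6"), ("7", "7"), ("8", "8"), ("9", "9"),
--          ("one", "1"), ("two", "2"), ("three", "3"), ("four", "4"),
--          ("five", "5"), ("six", "6"), ("seven", "7"), ("eight", "8"),
--          ("nine", "9")]
--
--
-- def findZahl2(line):
--     for i in range(len(line) - 1, -1, -1):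
--         for word, digit in WORDS:
--             if line.startswith(word, i):
--                 return digit
--     return "0"
-- ===== Notes on version B (the rewrite author's own statement) =====
-- stated objective: alternative
-- what changed: Replaces A's 18 full rfind scans plus max/tie-break bookkeeping with a single right-to-left positional scan over a word-to-digit pair table that returns at the first (rightmost) match; no index arithmetic into the numbers tuple is needed.
import Mathlib
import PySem

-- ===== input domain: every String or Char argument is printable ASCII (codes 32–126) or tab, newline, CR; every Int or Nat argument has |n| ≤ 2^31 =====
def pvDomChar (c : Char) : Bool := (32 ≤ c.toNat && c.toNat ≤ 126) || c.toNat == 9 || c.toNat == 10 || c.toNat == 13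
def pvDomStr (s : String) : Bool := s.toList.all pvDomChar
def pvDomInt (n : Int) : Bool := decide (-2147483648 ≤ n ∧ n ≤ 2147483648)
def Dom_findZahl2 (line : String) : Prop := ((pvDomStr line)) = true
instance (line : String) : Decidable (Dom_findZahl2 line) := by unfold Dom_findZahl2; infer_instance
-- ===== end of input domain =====

-- B replaces A's 18 full rfind scans (max index + list-order tie-break) by one right-to-left
-- positional scan over a word→digit pair table, returning at the first (rightmost) match. Objective: alternative.

-- ===== PORT A =====
def fzNumbers : List String :=
  ["1", "2", "3", "4", "5", "6", "7", "8", "9",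
   "one", "two", "three", "four", "five", "six", "seven", "eight", "nine"]

-- numbers.index(number): index? never returns none here (number ∈ fzNumbers), so getD 0 is exact
def fzDigit (number : String) : String :=
  let k := (PySem.List.index? fzNumbers number).getD 0
  if k < 9 then number else PySem.Int.toStr ((k : Int) - 8)

def fzStep (line : String) (st : Int × String) (number : String) : Int × String :=
  let indexOfNumber := PySem.Str.rfind line number
  if indexOfNumber ≠ -1 ∧ st.1 < indexOfNumber then (indexOfNumber, fzDigit number) else st

def findZahl2 (line : String) : String :=
  (fzNumbers.foldl (fzStep line) (-1, "0")).2

-- ===== PORT B =====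
def fzWords : List (String × String) :=
  [("1", "1"), ("2", "2"), ("3", "3"), ("4", "4"), ("5", "5"),
   ("6", "6"), ("7", "7"), ("8", "8"), ("9", "9"),
   ("one", "1"), ("two", "2"), ("three", "3"), ("four", "4"),
   ("five", "5"), ("six", "6"), ("seven", "7"), ("eight", "8"), ("nine", "9")]

-- line.startswith(word, i) with 0 ≤ i: exact as a prefix test on the dropped tail
def fzInner (cs : List Char) (i : Nat) : Option String :=
  fzWords.findSome? (fun wd => if PySem.Chars.startswith (cs.drop i) wd.1.toList then some wd.2 else none)

-- the loop 'for i in range(len(line)-1, -1, -1)' with early return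
def fzGo (cs : List Char) : Nat → String
  | 0 => "0"
  | i + 1 =>
    match fzInner cs i with
    | some d => d
    | none => fzGo cs i

def findZahl2_alt (line : String) : String :=
  fzGo line.toList line.toList.length

-- ===== PRECONDITION & SPEC =====
def Spec_findZahl2 (line : String) (out : String) : Prop := out = findZahl2_alt line
instance (line : String) (out : String) : Decidable (Spec_findZahl2 line out) := by unfold Spec_findZahl2; infer_instance

-- ===== CLAIM (what is proved, stated in full; the proofs are below) =====
def Claim_equal_findZahl2 : Prop := ∀ (line : String), Dom_findZahl2 line → Spec_findZahl2 line (findZahl2 line)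

-- ===== LEMMAS AND PROOFS =====

-- characterization of PySem.Chars.rfind.go: -1 and no prefix up to k, or the largest j ≤ k with a prefix
theorem fz_go_elim (cs w : List Char) (k : Nat) :
    (PySem.Chars.rfind.go cs w k = -1 ∧ ∀ j ≤ k, ¬ w <+: cs.drop j) ∨
    (∃ j ≤ k, PySem.Chars.rfind.go cs w k = (j : Int) ∧ w <+: cs.drop j ∧
      ∀ j', j < j' → j' ≤ k → ¬ w <+: cs.drop j') := by
  induction k with
  | zero =>
    by_cases h : w <+: cs
    · exact Or.inr ⟨0, le_rfl, by simp [PySem.Chars.rfind.go, List.isPrefixOf_iff_prefix, h], by simpa using h, by omega⟩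
    · refine Or.inl ⟨by simp [PySem.Chars.rfind.go, List.isPrefixOf_iff_prefix, h], ?_⟩
      intro j hj; interval_cases j; simpa using h
  | succ k ih =>
    by_cases h : w <+: cs.drop (k + 1)
    · exact Or.inr ⟨k + 1, le_rfl, by simp [PySem.Chars.rfind.go, List.isPrefixOf_iff_prefix, h], h, by omega⟩
    · have hgo : PySem.Chars.rfind.go cs w (k + 1) = PySem.Chars.rfind.go cs w k := by
        simp [PySem.Chars.rfind.go, List.isPrefixOf_iff_prefix, h]
      rcases ih with ⟨h1, h2⟩ | ⟨j, hj, hjeq, hjpre, hjmax⟩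
      · refine Or.inl ⟨hgo.trans h1, ?_⟩
        intro j hj
        rcases Nat.lt_or_ge j (k + 1) with hlt | hge
        · exact h2 j (by omega)
        · have : j = k + 1 := by omega
          subst this; exact h
      · refine Or.inr ⟨j, by omega, hgo.trans hjeq, hjpre, ?_⟩
        intro j' hj1 hj2
        rcases Nat.lt_or_ge j' (k + 1) with hlt | hge
        · exact hjmax j' hj1 (by omega)
        · have : j' = k + 1 := by omega
          subst this; exact h

theorem fz_rfind_elim (cs w : List Char) :
    (PySem.Chars.rfind cs w = -1 ∧ ∀ j ≤ cs.length, ¬ w <+: cs.drop j) ∨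
    (∃ j ≤ cs.length, PySem.Chars.rfind cs w = (j : Int) ∧ w <+: cs.drop j ∧
      ∀ j', j < j' → j' ≤ cs.length → ¬ w <+: cs.drop j') :=
  fz_go_elim cs w cs.length

-- a nonempty prefix of a dropped tail starts strictly inside the list
theorem fz_prefix_lt_len (cs w : List Char) (j : Nat) (hw : w ≠ []) (h : w <+: cs.drop j) :
    j < cs.length := by
  have hlen := h.length_le
  have hw' : 0 < w.length := List.length_pos_iff.mpr hw
  simp [List.length_drop] at hlen
  omega

theorem fz_rfind_ge (cs w : List Char) (j : Nat) (hw : w ≠ []) (h : w <+: cs.drop j) :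
    (j : Int) ≤ PySem.Chars.rfind cs w := by
  have hj : j ≤ cs.length := le_of_lt (fz_prefix_lt_len cs w j hw h)
  rcases fz_rfind_elim cs w with ⟨_, h2⟩ | ⟨j0, hj0, heq, _, hmax⟩
  · exact absurd h (h2 j hj)
  · rw [heq]
    by_contra hcon
    exact hmax j (by omega) hj h

-- the loop invariant for A's fold
def fzInv (cs : List Char) (ws : List String) (st : Int × String) : Prop :=
  (st = (-1, "0") ∧ ∀ w ∈ ws, PySem.Chars.rfind cs w.toList = -1) ∨
  (∃ J : Nat, ∃ l w r, st.1 = (J : Int) ∧ ws = l ++ w :: r ∧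
    PySem.Chars.rfind cs w.toList = (J : Int) ∧ st.2 = fzDigit w ∧
    (∀ w' ∈ l, PySem.Chars.rfind cs w'.toList < (J : Int)) ∧
    (∀ w' ∈ ws, PySem.Chars.rfind cs w'.toList ≤ (J : Int)))

-- rfind = J pins the rightmost occurrence: a prefix at J, none later
theorem fz_rfind_spec (cs w : List Char) (J : Nat)
    (h : PySem.Chars.rfind cs w = (J : Int)) :
    J ≤ cs.length ∧ w <+: cs.drop J ∧ ∀ j', J < j' → j' ≤ cs.length → ¬ w <+: cs.drop j' := by
  rcases fz_rfind_elim cs w with ⟨h1, _⟩ | ⟨j, hj, heq, hpre, hmax⟩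
  · rw [h] at h1; omega
  · have : j = J := by rw [h] at heq; omega
    subst this; exact ⟨hj, hpre, hmax⟩

theorem fz_rfind_neg (cs w : List Char) (h : PySem.Chars.rfind cs w = -1) :
    ∀ j ≤ cs.length, ¬ w <+: cs.drop j := by
  rcases fz_rfind_elim cs w with ⟨_, h2⟩ | ⟨j, _, heq, _, _⟩
  · exact h2
  · rw [h] at heq; omega

theorem fz_foldl_inv (line : String) (ws : List String) :
    fzInv line.toList ws (ws.foldl (fzStep line) (-1, "0")) := by
  induction ws using List.reverseRecOn with
  | nil => exact Or.inl ⟨rfl, by simp⟩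
  | append_singleton ws w ih =>
    rw [List.foldl_append]
    set st := ws.foldl (fzStep line) (-1, "0") with hst
    show fzInv line.toList (ws ++ [w]) (fzStep line st w)
    unfold fzStep
    simp only [PySem.Str.rfind_eq]
    rcases fz_rfind_elim line.toList w.toList with ⟨hneg, _⟩ | ⟨J', hJ'le, heq, hpre, hmax⟩
    · rw [hneg, if_neg (by simp)]
      rcases ih with ⟨h1, h2⟩ | ⟨J, l, wm, r, h1, h2, h3, h4, h5, h6⟩
      · refine Or.inl ⟨h1, ?_⟩
        intro w' hw'
        rcases List.mem_append.mp hw' with h | h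
        · exact h2 w' h
        · simp only [List.mem_singleton] at h; subst h; exact hneg
      · refine Or.inr ⟨J, l, wm, r ++ [w], h1, by rw [h2]; simp, h3, h4, h5, ?_⟩
        intro w' hw'
        rcases List.mem_append.mp hw' with h | h
        · exact h6 w' h
        · simp only [List.mem_singleton] at h; subst h; rw [hneg]; omega
    · rw [heq]
      by_cases hc : st.1 < (J' : Int)
      · rw [if_pos ⟨by omega, hc⟩]
        have hle : ∀ w' ∈ ws, PySem.Chars.rfind line.toList w'.toList < (J' : Int) := by
          intro w' hw'
          rcases ih with ⟨h1, h2⟩ | ⟨J, l, wm, r, h1, h2, h3, h4, h5, h6⟩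
          · rw [h2 w' hw']
            have : st.1 = -1 := by rw [h1]
            omega
          · have := h6 w' hw'; rw [h1] at hc; omega
        refine Or.inr ⟨J', ws, w, [], rfl, by simp, heq, rfl, hle, ?_⟩
        intro w' hw'
        rcases List.mem_append.mp hw' with h | h
        · exact le_of_lt (hle w' h)
        · simp only [List.mem_singleton] at h; subst h; rw [heq]
      · rw [if_neg (by simp only [not_and, not_lt]; intro _; omega)]
        rcases ih with ⟨h1, h2⟩ | ⟨J, l, wm, r, h1, h2, h3, h4, h5, h6⟩
        · exfalso
          have : st.1 = -1 := by rw [h1]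
          omega
        · refine Or.inr ⟨J, l, wm, r ++ [w], h1, by rw [h2]; simp, h3, h4, h5, ?_⟩
          intro w' hw'
          rcases List.mem_append.mp hw' with h | h
          · exact h6 w' h
          · simp only [List.mem_singleton] at h; subst h
            rw [heq]; rw [h1] at hc; omega

theorem fzGo_none (cs : List Char) (n : Nat) (h : ∀ j < n, fzInner cs j = none) :
    fzGo cs n = "0" := by
  induction n with
  | zero => rfl
  | succ n ih =>
    have := h n (by omega)
    simp [fzGo, this]
    exact ih (fun j hj => h j (by omega))

theorem fzGo_find (cs : List Char) (n j : Nat) (d : String) (hj : j < n)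
    (hsome : fzInner cs j = some d) (hnone : ∀ k, j < k → k < n → fzInner cs k = none) :
    fzGo cs n = d := by
  induction n with
  | zero => omega
  | succ n ih =>
    rcases Nat.lt_or_ge j n with hlt | hge
    · have := hnone n (by omega) (by omega)
      simp [fzGo, this]
      exact ih hlt (fun k h1 h2 => hnone k h1 (by omega))
    · have : j = n := by omega
      subst this
      simp [fzGo, hsome]

theorem fz_words_map : fzWords = fzNumbers.map (fun w => (w, fzDigit w)) := by decide

theorem fz_numbers_ne_nil : ∀ w ∈ fzNumbers, w.toList ≠ [] := by decide

theorem fz_words_fst : ∀ p ∈ fzWords, p.1 ∈ fzNumbers := by decide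

-- ===== VERDICT (by name: the statement is the Claim_ definition above) =====
theorem findZahl2_spec : Claim_equal_findZahl2 := by
  intro line _
  unfold Spec_findZahl2 findZahl2 findZahl2_alt
  have hinv := fz_foldl_inv line fzNumbers
  rcases hinv with ⟨h1, h2⟩ | ⟨J, l, w, r, h1, h2, h3, h4, h5, h6⟩
  · rw [h1]
    rw [fzGo_none]
    intro j hj
    unfold fzInner
    apply List.findSome?_eq_none_iff.mpr
    intro wd hwd
    have hmem : wd.1 ∈ fzNumbers := fz_words_fst wd hwd
    have hno := fz_rfind_neg line.toList wd.1.toList (h2 wd.1 hmem) j (by omega)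
    rw [if_neg (by rw [PySem.Chars.startswith_iff]; exact hno)]
  · rw [h4]
    have hw : w ∈ fzNumbers := by rw [h2]; simp
    have hspec := fz_rfind_spec line.toList w.toList J h3
    have hJlt : J < line.toList.length :=
      fz_prefix_lt_len line.toList w.toList J (fz_numbers_ne_nil w hw) hspec.2.1
    refine (fzGo_find line.toList line.toList.length J (fzDigit w) hJlt ?_ ?_).symm
    · -- fzInner at J finds w first
      unfold fzInner
      rw [fz_words_map, h2]
      rw [List.map_append, List.map_cons, List.findSome?_append]
      have hl : List.findSome?
          (fun wd => if PySem.Chars.startswith (line.toList.drop J) wd.1.toList then some wd.2 else none)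
          (l.map (fun w => (w, fzDigit w))) = none := by
        apply List.findSome?_eq_none_iff.mpr
        intro wd hwd
        obtain ⟨x, hx, hxe⟩ := List.mem_map.mp hwd
        subst hxe
        rw [if_neg]
        rw [PySem.Chars.startswith_iff]
        intro hpref
        have hxne : x.toList ≠ [] := fz_numbers_ne_nil x (by rw [h2]; simp [hx])
        have := fz_rfind_ge line.toList x.toList J hxne hpref
        have := h5 x hx
        omega
      rw [hl, Option.none_or, List.findSome?_cons]
      rw [if_pos (by rw [PySem.Chars.startswith_iff]; exact hspec.2.1)]
    · -- no word matches strictly to the right of J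
      intro k hk1 hk2
      unfold fzInner
      apply List.findSome?_eq_none_iff.mpr
      intro wd hwd
      have hmem : wd.1 ∈ fzNumbers := fz_words_fst wd hwd
      rw [if_neg]
      rw [PySem.Chars.startswith_iff]
      intro hpref
      have hne : wd.1.toList ≠ [] := fz_numbers_ne_nil wd.1 hmem
      have := fz_rfind_ge line.toList wd.1.toList k hne hpref
      have := h6 wd.1 hmem
      omega
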